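-- pv_equiv track=rewrite | github.com/ToyotaResearchInstitute/tristan | data_sources/argoverse/create_adovehicle_maneuver_labels_argoverse.py | smooth_index_label
-- ===== SOURCE A (Python) =====
-- import copy
--
-- def smooth_index_label(lane_indices):
--     """
--     Smooth a list of indices, such that there is no subsequences that start and end with the same index, but has
--     different indices in between.
--     This is used to provide cleaner labels when an agent follows a lane but crosses other lanes.
--     Parameters
--     ----------
--     lane_indices: input indices.
--
--     Returns
--     -------
--
--     """
--     lane_indices = copy.deepcopy(lane_indices)
--     start_index = lane_indices[0]
--     for i in range(1, len(lane_indices)):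
--         if lane_indices[i] == start_index:
--             start_index = lane_indices[i]
--         else:
--             noise = False
--             for j in range(i + 1, len(lane_indices)):
--                 if lane_indices[j] == start_index:
--                     noise = True
--                     for k in range(i, j):
--                         lane_indices[k] = start_index
--                     i = j
--                     break
--             if not noise:
--                 start_index = lane_indices[i]
--     return lane_indices
-- ===== SOURCE B (Python) =====
-- def smooth_index_label(lane_indices):
--     # One pass: precompute each value's last-occurrence index; emit each
--     # segment's value up to that last occurrence, then jump past it.
--     last = {}
--     for i, v in enumerate(lane_indices):
--         last[v] = i
--     out = []
--     i = 0
--     n = len(lane_indices)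
--     while i < n:
--         v = lane_indices[i]
--         j = last[v]
--         out.extend([v] * (j - i + 1))
--         i = j + 1
--     return out
-- ===== Notes on version B (the rewrite author's own statement) =====
-- stated objective: faster
-- what changed: A repeatedly scans ahead from every deviating index and overwrites excursions in place (nested loops); B builds a last-occurrence dict in one pass and then emits each segment's value straight through to its last occurrence, jumping past it.
import Mathlib
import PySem

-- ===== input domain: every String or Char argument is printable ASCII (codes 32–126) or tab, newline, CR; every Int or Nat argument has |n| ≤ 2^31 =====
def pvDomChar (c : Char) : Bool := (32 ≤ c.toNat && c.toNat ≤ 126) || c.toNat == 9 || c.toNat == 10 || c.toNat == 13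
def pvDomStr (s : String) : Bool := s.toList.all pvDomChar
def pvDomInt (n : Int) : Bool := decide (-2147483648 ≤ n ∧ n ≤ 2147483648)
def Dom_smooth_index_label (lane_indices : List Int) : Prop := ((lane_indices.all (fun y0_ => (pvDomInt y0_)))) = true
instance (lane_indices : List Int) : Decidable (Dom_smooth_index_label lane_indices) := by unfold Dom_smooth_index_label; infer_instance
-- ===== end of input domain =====

-- B replaces A's quadratic rescanning (for each deviating index, scan ahead for the start
-- value and overwrite the excursion) by a single pass over a precomputed last-occurrence
-- dict: emit each segment's value up to its last occurrence and jump past it.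

-- ===== PORT A =====
-- 'for k in range(i, j): lane_indices[k] = start_index'
def pvFillLoop (arr : List Int) (s : Int) (ks : List Int) : List Int :=
  ks.foldl (fun a k => PySem.List.pySetD a k s) arr

-- inner 'for j in range(i+1, n): if lane_indices[j] == start_index: noise = True; fill; break'
-- (returns the filled array iff the break fired, i.e. iff noise; A's 'i = j' is a dead store)
def pvInnerJ (arr : List Int) (s : Int) (i : Int) (js : List Int) : Option (List Int) :=
  match js with
  | [] => none
  | j :: rest =>
      if PySem.List.pyGetD arr j 0 = s then
        some (pvFillLoop arr s (PySem.List.pyRange i j 1))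
      else pvInnerJ arr s i rest

-- one iteration of A's outer loop: state = (array, start_index)
def pvStep (n : Int) (st : List Int × Int) (i : Int) : List Int × Int :=
  if PySem.List.pyGetD st.1 i 0 = st.2 then (st.1, PySem.List.pyGetD st.1 i 0)
  else
    match pvInnerJ st.1 st.2 i (PySem.List.pyRange (i + 1) n 1) with
    | some arr' => (arr', st.2)
    | none => (st.1, PySem.List.pyGetD st.1 i 0)

def smooth_index_label (lane_indices : List Int) : List Int :=
  ((PySem.List.pyRange 1 (lane_indices.length : Int) 1).foldl
      (pvStep (lane_indices.length : Int))
      (lane_indices, PySem.List.pyGetD lane_indices 0 0)).1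

-- ===== PORT B =====
-- last = {}; for i, v in enumerate(lane_indices): last[v] = i
def pvLastDict (xs : List Int) : PySem.Dict Int Int :=
  (PySem.List.enumerate xs 0).foldl (fun d p => d.insert p.2 p.1) PySem.Dict.empty

-- while i < n: v = xs[i]; j = last[v]; out += [v]*(j-i+1); i = j+1   (fuel n bounds the iterations)
def pvBLoop (xs : List Int) (last : PySem.Dict Int Int) (n : Int) (fuel : Nat) (i : Int)
    (out : List Int) : List Int :=
  match fuel with
  | 0 => out
  | fuel + 1 =>
      if i < n then
        let v := PySem.List.pyGetD xs i 0
        let j := last.getD v 0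
        pvBLoop xs last n fuel (j + 1) (out ++ List.replicate (j - i + 1).toNat v)
      else out

def smooth_index_label_alt (lane_indices : List Int) : List Int :=
  pvBLoop lane_indices (pvLastDict lane_indices) (lane_indices.length : Int)
    lane_indices.length 0 []

-- ===== PRECONDITION & SPEC =====
-- Python A raises IndexError on the empty list (lane_indices[0]); Pre_ excludes exactly that input.
def Pre_smooth_index_label (lane_indices : List Int) : Prop := lane_indices ≠ []
instance (lane_indices : List Int) : Decidable (Pre_smooth_index_label lane_indices) := by
  unfold Pre_smooth_index_label; infer_instance
def pvWitness_smooth_index_label : List Int := [1, 2, 1, 3]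

def Spec_smooth_index_label (lane_indices : List Int) (out : List Int) : Prop :=
  out = smooth_index_label_alt lane_indices
instance (lane_indices : List Int) (out : List Int) : Decidable (Spec_smooth_index_label lane_indices out) := by
  unfold Spec_smooth_index_label; infer_instance

-- ===== CLAIM (what is proved, stated in full; the proofs are below) =====
def Claim_equal_smooth_index_label : Prop :=
  ∀ (lane_indices : List Int), Dom_smooth_index_label lane_indices →
    Pre_smooth_index_label lane_indices →
    Spec_smooth_index_label lane_indices (smooth_index_label lane_indices)

-- ===== LEMMAS AND PROOFS =====
def pvLastK (s : Int) (t : List Int) : Nat := t.length - t.reverse.idxOf s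

def pvJump : List Int → List Int
  | [] => []
  | v :: rest =>
      List.replicate (pvLastK v rest + 1) v ++ pvJump (rest.drop (pvLastK v rest))
termination_by l => l.length
decreasing_by simp

theorem pvJump_nil : pvJump [] = [] := by rw [pvJump.eq_def]

theorem pvJump_cons (v : Int) (rest : List Int) :
    pvJump (v :: rest) = List.replicate (pvLastK v rest + 1) v ++ pvJump (rest.drop (pvLastK v rest)) := by
  rw [pvJump.eq_def]

def pvFillPre (s : Int) (r : List Int) : List Int :=
  List.replicate (r.idxOf s) s ++ r.drop (r.idxOf s)

theorem pvFillPre_length (s : Int) (r : List Int) : (pvFillPre s r).length = r.length := by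
  have := List.idxOf_le_length (a := s) (l := r)
  simp [pvFillPre]; omega

theorem pvLastK_not_mem {s : Int} {r : List Int} (h : s ∉ r) : pvLastK s r = 0 := by
  have : r.reverse.idxOf s = r.reverse.length := List.idxOf_eq_length (by simpa using h)
  simp [pvLastK, this]

theorem pvLastK_pos_of_mem {s : Int} {r : List Int} (h : s ∈ r) : 0 < pvLastK s r := by
  have h2 : r.reverse.idxOf s < r.reverse.length :=
    List.idxOf_lt_length_of_mem (by simpa using h)
  simp at h2
  unfold pvLastK; omega

theorem pvLastK_cons_of_mem {s : Int} {r : List Int} (x : Int) (h : s ∈ r) :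
    pvLastK s (x :: r) = pvLastK s r + 1 := by
  have h2 : r.reverse.idxOf s < r.length := by
    simpa using List.idxOf_lt_length_of_mem (l := r.reverse) (a := s) (by simpa using h)
  unfold pvLastK
  rw [List.reverse_cons, List.idxOf_append_of_mem (by simpa using h)]
  simp; omega

theorem pvLastK_cons_self_not_mem {s : Int} {r : List Int} (h : s ∉ r) :
    pvLastK s (s :: r) = 1 := by
  unfold pvLastK
  rw [List.reverse_cons, List.idxOf_append_of_notMem (by simpa using h)]
  simp

theorem pvLastK_cons_not_mem {s x : Int} {r : List Int} (hx : x ≠ s) (h : s ∉ r) :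
    pvLastK s (x :: r) = 0 := by
  apply pvLastK_not_mem
  simp only [List.mem_cons, not_or]
  exact ⟨fun hc => hx hc.symm, h⟩

theorem pvJump_cons_cons (s : Int) (r : List Int) :
    pvJump (s :: s :: r) = s :: pvJump (s :: r) := by
  by_cases h : s ∈ r
  · rw [pvJump_cons, pvJump_cons, pvLastK_cons_of_mem s h]
    simp [List.replicate_succ]
  · rw [pvJump_cons, pvJump_cons, pvLastK_cons_self_not_mem h, pvLastK_not_mem h]
    simp [List.replicate_succ]

theorem pvJump_new (s x : Int) (r : List Int) (hx : x ≠ s) (h : s ∉ r) :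
    pvJump (s :: x :: r) = s :: pvJump (x :: r) := by
  rw [pvJump_cons, pvLastK_cons_not_mem hx h]
  simp

-- first occurrence ≤ last occurrence
theorem pvIdx_le_lastK {s : Int} {r : List Int} (h : s ∈ r) :
    r.idxOf s ≤ pvLastK s r - 1 := by
  have h4 : r.reverse.idxOf s < r.length := by
    simpa using List.idxOf_lt_length_of_mem (l := r.reverse) (a := s) (by simpa using h)
  have h5 : r.reverse[r.reverse.idxOf s]'(by simpa using h4) = s :=
    List.getElem_idxOf (by simpa using h4)
  have h6 : r[r.length - 1 - r.reverse.idxOf s]'(by omega) = s :=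
    (List.getElem_reverse _).symm.trans h5
  have h7 : s ∈ r.take (r.length - 1 - r.reverse.idxOf s + 1) := by
    have hb : r.length - 1 - r.reverse.idxOf s < (r.take (r.length - 1 - r.reverse.idxOf s + 1)).length := by
      simp; omega
    have : (r.take (r.length - 1 - r.reverse.idxOf s + 1))[r.length - 1 - r.reverse.idxOf s]'hb = s := by
      rw [List.getElem_take]; exact h6
    exact List.mem_of_getElem this
  have h8 : r.idxOf s < r.length - 1 - r.reverse.idxOf s + 1 :=
    (List.mem_take_iff_idxOf_lt h).mp h7
  unfold pvLastK; omega

theorem pvMem_drop_idxOf {s : Int} {r : List Int} (h : s ∈ r) : s ∈ r.drop (r.idxOf s) := by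
  have hf : r.idxOf s < r.length := List.idxOf_lt_length_of_mem h
  rw [List.drop_eq_getElem_cons hf]
  simp [List.getElem_idxOf hf]

theorem pvFillPre_revIdx {s : Int} {r : List Int} (h : s ∈ r) :
    (pvFillPre s r).reverse.idxOf s = r.reverse.idxOf s := by
  have hmem : s ∈ (r.drop (r.idxOf s)).reverse := by simpa using pvMem_drop_idxOf h
  have h1 : (pvFillPre s r).reverse = (r.drop (r.idxOf s)).reverse ++ List.replicate (r.idxOf s) s := by
    simp [pvFillPre]
  have h2 : r.reverse = (r.drop (r.idxOf s)).reverse ++ (r.take (r.idxOf s)).reverse := by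
    conv_lhs => rw [← List.take_append_drop (r.idxOf s) r]
    simp
  rw [h1, h2, List.idxOf_append_of_mem hmem, List.idxOf_append_of_mem hmem]

theorem pvLastK_fillPre {s : Int} {r : List Int} (h : s ∈ r) :
    pvLastK s (pvFillPre s r) = pvLastK s r := by
  unfold pvLastK
  rw [pvFillPre_revIdx h, pvFillPre_length]

theorem pvDrop_lastK_fillPre {s : Int} {r : List Int} (h : s ∈ r) :
    (pvFillPre s r).drop (pvLastK s r) = r.drop (pvLastK s r) := by
  have hf : r.idxOf s ≤ pvLastK s r - 1 := pvIdx_le_lastK h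
  have hpos : 0 < pvLastK s r := pvLastK_pos_of_mem h
  unfold pvFillPre
  calc (List.replicate (r.idxOf s) s ++ r.drop (r.idxOf s)).drop (pvLastK s r)
      = (List.replicate (r.idxOf s) s ++ r.drop (r.idxOf s)).drop
          ((List.replicate (r.idxOf s) s).length + (pvLastK s r - r.idxOf s)) := by
        congr 1; simp; omega
    _ = (r.drop (r.idxOf s)).drop (pvLastK s r - r.idxOf s) := List.drop_length_add_append _
    _ = r.drop (r.idxOf s + (pvLastK s r - r.idxOf s)) := List.drop_drop
    _ = r.drop (pvLastK s r) := by congr 1; omega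

theorem pvJump_fill (s x : Int) (r : List Int) (h : s ∈ r) :
    pvJump (s :: x :: r) = s :: pvJump (s :: pvFillPre s r) := by
  rw [pvJump_cons, pvJump_cons, pvLastK_cons_of_mem x h, pvLastK_fillPre h,
    pvDrop_lastK_fillPre h]
  have hd : (x :: r).drop (pvLastK s r + 1) = r.drop (pvLastK s r) := rfl
  simp [hd, List.replicate_succ]

def pvGoS (s : Int) (l : List Int) : List Int :=
  match l with
  | [] => []
  | x :: r =>
      if x = s then s :: pvGoS s r
      else if s ∈ r then s :: pvGoS s (pvFillPre s r)
      else x :: pvGoS x r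
termination_by l.length
decreasing_by all_goals simp [pvFillPre_length]

theorem pvGoS_eq_pvJump (s : Int) (l : List Int) : s :: pvGoS s l = pvJump (s :: l) := by
  induction hn : l.length using Nat.strong_induction_on generalizing s l with
  | _ n ih =>
    match l with
    | [] => rw [pvGoS, pvJump_cons]; simp [pvLastK, pvJump_nil]
    | x :: r =>
      rw [pvGoS]
      by_cases hxs : x = s
      · subst hxs
        rw [if_pos rfl, pvJump_cons_cons, ih r.length (by simp [← hn]) x r rfl]
      · rw [if_neg hxs]
        by_cases hsr : s ∈ r
        · rw [if_pos hsr, pvJump_fill s x r hsr,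
            ih (pvFillPre s r).length (by simp [pvFillPre_length, ← hn]) s _ rfl]
        · rw [if_neg hsr, pvJump_new s x r hxs hsr, ih r.length (by simp [← hn]) x r rfl]

theorem pvGetD_append_len (pre t' : List Int) (y d : Int) :
    PySem.List.pyGetD (pre ++ y :: t') (pre.length : Int) d = y := by
  rw [PySem.List.pyGetD_natCast]
  simp [List.getD]

theorem pvFill_eq : ∀ (m : Nat) (pre t : List Int) (s : Int), m ≤ t.length →
    pvFillLoop (pre ++ t) s (PySem.List.pyRange (pre.length : Int) ((pre.length : Int) + m) 1)
    = pre ++ List.replicate m s ++ t.drop m := by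
  intro m
  induction m with
  | zero => intro pre t s _; simp [pvFillLoop, PySem.List.pyRange_one_eq_nil]
  | succ m ih =>
    intro pre t s hm
    match t with
    | y :: t' =>
      rw [PySem.List.pyRange_one_cons (by omega)]
      unfold pvFillLoop
      rw [List.foldl_cons]
      have h1 : PySem.List.pySetD (pre ++ y :: t') (pre.length : Int) s = (pre ++ [s]) ++ t' := by
        rw [PySem.List.pySetD_natCast]
        simp
      rw [h1]
      have h2 : ((pre.length : Int) + 1) = (((pre ++ [s]).length : Nat) : Int) := by simp
      have h3 : ((pre.length : Int) + (m + 1 : Nat)) = (((pre ++ [s]).length : Nat) : Int) + (m : Nat) := by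
        push_cast [List.length_append, List.length_cons, List.length_nil]; omega
      rw [h2, h3]
      have := ih (pre ++ [s]) t' s (by simp at hm; omega)
      unfold pvFillLoop at this
      rw [this]
      simp [List.replicate_succ]

theorem pvInnerJ_eq (s i : Int) : ∀ (r' q arr : List Int), arr = q ++ r' →
    pvInnerJ arr s i (PySem.List.pyRange (q.length : Int) ((q.length : Int) + (r'.length : Nat)) 1)
    = if s ∈ r' then
        some (pvFillLoop arr s (PySem.List.pyRange i ((q.length : Int) + (r'.idxOf s : Nat)) 1))
      else none := by
  intro r'
  induction r' with
  | nil => intro q arr _; simp [PySem.List.pyRange_one_eq_nil, pvInnerJ]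
  | cons y t ih =>
    intro q arr harr
    rw [PySem.List.pyRange_one_cons (by push_cast [List.length_cons]; omega)]
    unfold pvInnerJ
    rw [harr, pvGetD_append_len]
    by_cases hy : y = s
    · subst hy
      rw [if_pos rfl, if_pos (by simp)]
      simp
    · rw [if_neg hy]
      have h2 : ((q.length : Int) + 1) = (((q ++ [y]).length : Nat) : Int) := by simp
      have h3 : ((q.length : Int) + ((y :: t).length : Nat)) = (((q ++ [y]).length : Nat) : Int) + (t.length : Nat) := by
        push_cast [List.length_append, List.length_cons, List.length_nil]; omega
      rw [h2, h3]
      have := ih (q ++ [y]) (q ++ y :: t) (by simp)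
      rw [this]
      by_cases hst : s ∈ t
      · rw [if_pos hst, if_pos (by simp [hst])]
        have : (y :: t).idxOf s = t.idxOf s + 1 := by
          rw [List.idxOf_cons_ne _ hy]
        rw [this]
        congr 2
        push_cast [List.length_append, List.length_cons, List.length_nil]
        ring_nf
      · rw [if_neg hst, if_neg (by simp [hst]; exact fun hc => hy hc.symm)]

theorem pvALoop_eq (n : Int) : ∀ (fuel : Nat) (suffix pre : List Int) (s : Int),
    suffix.length ≤ fuel →
    n = (pre.length : Int) + (suffix.length : Nat) →
    ((PySem.List.pyRange (pre.length : Int) n 1).foldl (pvStep n) (pre ++ suffix, s)).1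
      = pre ++ pvGoS s suffix := by
  intro fuel
  induction fuel with
  | zero =>
    intro suffix pre s hf hn
    match suffix with
    | [] =>
      rw [pvGoS]
      have hle : n ≤ (pre.length : Int) := by simp at hn; omega
      simp [PySem.List.pyRange_one_eq_nil hle]
  | succ fuel ih =>
    intro suffix pre s hf hn
    match suffix with
    | [] =>
      rw [pvGoS]
      have hle : n ≤ (pre.length : Int) := by simp at hn; omega
      simp [PySem.List.pyRange_one_eq_nil hle]
    | x :: r =>
      have hlt : (pre.length : Int) < n := by
        rw [hn]; push_cast [List.length_cons]; omega
      rw [PySem.List.pyRange_one_cons hlt, List.foldl_cons]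
      have hget : PySem.List.pyGetD (pre ++ x :: r) (pre.length : Int) 0 = x :=
        pvGetD_append_len pre r x 0
      rw [pvGoS]
      by_cases hxs : x = s
      · -- equal branch
        have hstep : pvStep n (pre ++ x :: r, s) (pre.length : Int) = (pre ++ x :: r, x) := by
          simp [pvStep, hxs]
        rw [hstep, if_pos hxs]
        have h2 : ((pre.length : Int) + 1) = (((pre ++ [x]).length : Nat) : Int) := by
          push_cast [List.length_append, List.length_cons, List.length_nil]; omega
        rw [h2, show pre ++ x :: r = (pre ++ [x]) ++ r by simp]
        rw [ih r (pre ++ [x]) x (by simp at hf; omega)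
          (by rw [hn]; push_cast [List.length_append, List.length_cons, List.length_nil]; omega)]
        simp [hxs]
      · -- deviating element
        have h2 : (((pre ++ [x]).length : Nat) : Int) = (pre.length : Int) + 1 := by
          push_cast [List.length_append, List.length_cons, List.length_nil]; omega
        have h3 : ((pre.length : Int) + 1) + (r.length : Nat) = n := by
          rw [hn]; push_cast [List.length_cons]; omega
        have hinner := pvInnerJ_eq s (pre.length : Int) r (pre ++ [x]) (pre ++ x :: r) (by simp)
        rw [h2, h3] at hinner
        by_cases hsr : s ∈ r
        · rw [if_pos hsr] at hinner
          have hidx : r.idxOf s < r.length := List.idxOf_lt_length_of_mem hsr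
          have hfill := pvFill_eq (r.idxOf s + 1) pre (x :: r) s (by simp; omega)
          rw [show ((pre.length : Int) + ((r.idxOf s + 1 : Nat) : Int)) = (pre.length : Int) + 1 + ((r.idxOf s : Nat) : Int) by push_cast; omega] at hfill
          rw [hfill] at hinner
          have hstep : pvStep n (pre ++ x :: r, s) (pre.length : Int)
              = ((pre ++ [s]) ++ pvFillPre s r, s) := by
            simp only [pvStep, hget, if_neg hxs, hinner]
            simp [pvFillPre, List.replicate_succ]
          rw [hstep, if_neg hxs, if_pos hsr]
          have h2' : ((pre.length : Int) + 1) = (((pre ++ [s]).length : Nat) : Int) := by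
            push_cast [List.length_append, List.length_cons, List.length_nil]; omega
          rw [h2']
          rw [ih (pvFillPre s r) (pre ++ [s]) s
            (by rw [pvFillPre_length]; simp at hf; omega)
            (by rw [hn]; push_cast [List.length_append, List.length_cons, List.length_nil, pvFillPre_length]; omega)]
          simp
        · rw [if_neg hsr] at hinner
          have hstep : pvStep n (pre ++ x :: r, s) (pre.length : Int) = (pre ++ x :: r, x) := by
            simp only [pvStep, hget, if_neg hxs, hinner]
          rw [hstep, if_neg hxs, if_neg hsr]
          have h2' : ((pre.length : Int) + 1) = (((pre ++ [x]).length : Nat) : Int) := by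
            push_cast [List.length_append, List.length_cons, List.length_nil]; omega
          rw [h2', show pre ++ x :: r = (pre ++ [x]) ++ r by simp]
          rw [ih r (pre ++ [x]) x (by simp at hf; omega)
            (by rw [hn]; push_cast [List.length_append, List.length_cons, List.length_nil]; omega)]
          simp

theorem smooth_index_label_nil : smooth_index_label [] = [] := by
  simp [smooth_index_label, PySem.List.pyRange_one_eq_nil]

theorem smooth_index_label_cons (v : Int) (rest : List Int) :
    smooth_index_label (v :: rest) = v :: pvGoS v rest := by
  unfold smooth_index_label
  have h0 : PySem.List.pyGetD (v :: rest) 0 0 = v := by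
    simp [PySem.List.pyGetD_zero_cons]
  rw [h0]
  have h := pvALoop_eq (((v :: rest).length : Nat) : Int) rest.length rest [v] v le_rfl
    (by push_cast [List.length_cons, List.length_nil]; omega)
  simp only [List.length_singleton, Nat.cast_one, List.singleton_append] at h
  rw [h]

-- last[v] is the index of the last occurrence of v
theorem pvLastDict_getD (xs : List Int) (v : Int) (h : v ∈ xs) :
    (pvLastDict xs).getD v 0 = (xs.length : Int) - 1 - (xs.reverse.idxOf v : Nat) := by
  induction xs using List.reverseRecOn with
  | nil => simp at h
  | append_singleton ys y ih =>
    have hsplit : pvLastDict (ys ++ [y]) = (pvLastDict ys).insert y (ys.length : Int) := by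
      unfold pvLastDict
      rw [PySem.List.enumerate_append, List.foldl_append]
      simp [PySem.List.enumerate_cons, PySem.List.enumerate_nil]
    rw [hsplit, PySem.Dict.getD_insert]
    by_cases hv : v = y
    · subst hv
      rw [if_pos rfl]
      simp [List.reverse_append]
    · rw [if_neg hv]
      have hv' : v ∈ ys := by
        rcases List.mem_append.mp h with h1 | h1
        · exact h1
        · simp at h1; exact absurd h1 hv
      rw [ih hv']
      have hidx : (ys ++ [y]).reverse.idxOf v = ys.reverse.idxOf v + 1 := by
        rw [List.reverse_append]
        simp [List.idxOf_cons_ne _ (fun hc => hv hc.symm)]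
      rw [hidx]
      have : ys.reverse.idxOf v < ys.length := by
        simpa using List.idxOf_lt_length_of_mem (l := ys.reverse) (a := v) (by simpa using hv')
      push_cast [List.length_append, List.length_cons, List.length_nil]
      omega

theorem pvJ_at (xs : List Int) (m : Nat) (v : Int) (rest : List Int)
    (hm : m ≤ xs.length) (ht : xs.drop m = v :: rest) :
    (pvLastDict xs).getD v 0 = (m : Int) + (pvLastK v rest : Nat) := by
  have hvd : v ∈ xs.drop m := by rw [ht]; simp
  have hv : v ∈ xs := List.mem_of_mem_drop hvd
  rw [pvLastDict_getD xs v hv]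
  have hlen : xs.length = m + rest.length + 1 := by
    have := List.length_drop (l := xs) (i := m)
    rw [ht] at this
    simp at this
    omega
  have hrev : xs.reverse.idxOf v = (xs.drop m).reverse.idxOf v := by
    conv_lhs => rw [← List.take_append_drop m xs]
    rw [List.reverse_append]
    exact List.idxOf_append_of_mem (by simpa using hvd)
  rw [hrev, ht, List.reverse_cons]
  by_cases hvr : v ∈ rest
  · rw [List.idxOf_append_of_mem (by simpa using hvr)]
    have he : rest.reverse.idxOf v < rest.length := by
      simpa using List.idxOf_lt_length_of_mem (l := rest.reverse) (a := v) (by simpa using hvr)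
    unfold pvLastK
    omega
  · rw [List.idxOf_append_of_notMem (by simpa using hvr)]
    have hk : pvLastK v rest = 0 := by
      have : rest.reverse.idxOf v = rest.reverse.length := List.idxOf_eq_length (by simpa using hvr)
      simp [pvLastK, this]
    rw [hk]
    simp
    omega

theorem pvBLoop_eq (xs : List Int) : ∀ (fuel m : Nat) (out : List Int), m ≤ xs.length →
    xs.length - m ≤ fuel →
    pvBLoop xs (pvLastDict xs) (xs.length : Int) fuel ((m : Nat) : Int) out
      = out ++ pvJump (xs.drop m) := by
  intro fuel
  induction fuel with
  | zero =>
    intro m out hm hf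
    have hme : m = xs.length := by omega
    subst hme
    simp [pvBLoop, pvJump_nil]
  | succ fuel ih =>
    intro m out hm hf
    by_cases hlt : m < xs.length
    · have hi : ((m : Nat) : Int) < (xs.length : Int) := by exact_mod_cast hlt
      rw [pvBLoop, if_pos hi]
      have hdrop := List.drop_eq_getElem_cons hlt
      set v := xs[m]'hlt with hv
      set rest := xs.drop (m + 1) with hrest
      have hget : PySem.List.pyGetD xs ((m : Nat) : Int) 0 = v := by
        rw [PySem.List.pyGetD_natCast]
        simp [List.getD, List.getElem?_eq_getElem hlt]
        exact hv.symm
      have hj := pvJ_at xs m v rest (by omega) hdrop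
      dsimp only
      rw [hget, hj]
      have hrl : xs.length = m + rest.length + 1 := by
        have := List.length_drop (l := xs) (i := m)
        rw [hdrop] at this
        simp at this
        omega
      have hkr : pvLastK v rest ≤ rest.length := by unfold pvLastK; omega
      have hk1 : ((m : Int) + (pvLastK v rest : Nat) - (m : Nat) + 1).toNat = pvLastK v rest + 1 := by
        omega
      have hk2 : ((m : Int) + (pvLastK v rest : Nat) + 1) = (((m + pvLastK v rest + 1 : Nat) : Nat) : Int) := by
        push_cast; omega
      rw [hk1, hk2]
      rw [ih (m + pvLastK v rest + 1) _ (by omega) (by omega)]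
      rw [hdrop, pvJump_cons]
      have hdd : List.drop (m + pvLastK v rest + 1) xs = rest.drop (pvLastK v rest) := by
        rw [hrest, List.drop_drop]
        congr 1
        omega
      rw [hdd, List.append_assoc]
    · have hme : m = xs.length := by omega
      rw [pvBLoop, if_neg (by exact_mod_cast (by omega : ¬ ((m:Nat):Int) < (xs.length : Int)))]
      subst hme
      simp [List.drop_length, pvJump_nil]

theorem smooth_index_label_alt_eq_pvJump (xs : List Int) :
    smooth_index_label_alt xs = pvJump xs := by
  unfold smooth_index_label_alt
  have := pvBLoop_eq xs xs.length 0 [] (by omega) (by omega)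
  simpa using this

theorem smooth_index_label_eq_pvJump (xs : List Int) :
    smooth_index_label xs = pvJump xs := by
  match xs with
  | [] => rw [smooth_index_label_nil, pvJump_nil]
  | v :: rest => rw [smooth_index_label_cons, pvGoS_eq_pvJump]

-- ===== VERDICT (by name: the statement is the Claim_ definition above) =====
theorem smooth_index_label_spec : Claim_equal_smooth_index_label := by
  intro xs _ _
  unfold Spec_smooth_index_label
  rw [smooth_index_label_eq_pvJump, smooth_index_label_alt_eq_pvJump]
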